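-- pv_equiv track=rewrite | github.com/OscarTsao/bitoguard-hackathon | bitoguard_core/features/graph_bipartite.py | _degree_buckets
-- ===== SOURCE A (Python) =====
-- _DEGREE_BUCKETS = [1, 3, 10, 50, 200]   # upper bounds; anything above 200 → "over200"
--
-- def _bucket_label(upper: int) -> str:
--     return f"deg_lte{upper}"
--
-- def _degree_buckets(entity_degrees: list[int]) -> dict[str, int]:
--     out = {_bucket_label(b): 0 for b in _DEGREE_BUCKETS}
--     out["deg_over200"] = 0
--     for deg in entity_degrees:
--         placed = False
--         for b in _DEGREE_BUCKETS:
--             if deg <= b: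
--                 out[_bucket_label(b)] += 1
--                 placed = True
--                 break
--         if not placed:
--             out["deg_over200"] += 1
--     return out
-- ===== SOURCE B (Python) =====
-- _THRESHOLDS = (1, 3, 10, 50, 200)
--
-- def _degree_buckets(entity_degrees):
--     # cumulative counts (# of degrees <= t) for each threshold, then successive
--     # differences give the bucket sizes -- no per-element bucket search.
--     n = len(entity_degrees)
--     c1, c3, c10, c50, c200 = (sum(d <= t for d in entity_degrees) for t in _THRESHOLDS)
--     return {
--         "deg_lte1": c1,
--         "deg_lte3": c3 - c1,
--         "deg_lte10": c10 - c3,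
--         "deg_lte50": c50 - c10,
--         "deg_lte200": c200 - c50,
--         "deg_over200": n - c200,
--     }
-- ===== Notes on version B (the rewrite author's own statement) =====
-- stated objective: alternative
-- what changed: Replaces the per-element nested bucket-search loop with mutable dict counters by five whole-list cumulative counts (elements <= each threshold) whose successive differences give the bucket sizes, assembling the dict once as a literal.
import Mathlib
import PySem

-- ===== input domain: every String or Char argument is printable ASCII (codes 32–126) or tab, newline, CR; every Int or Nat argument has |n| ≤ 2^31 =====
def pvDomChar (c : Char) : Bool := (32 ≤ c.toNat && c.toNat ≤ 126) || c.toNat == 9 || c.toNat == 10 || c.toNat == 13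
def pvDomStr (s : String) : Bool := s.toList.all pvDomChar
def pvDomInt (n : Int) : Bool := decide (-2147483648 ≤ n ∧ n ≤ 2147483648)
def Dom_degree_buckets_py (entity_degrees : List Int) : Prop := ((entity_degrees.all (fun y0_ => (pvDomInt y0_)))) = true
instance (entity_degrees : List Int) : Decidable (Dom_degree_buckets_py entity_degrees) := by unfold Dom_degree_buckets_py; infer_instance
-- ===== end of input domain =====

-- B replaces A's per-element nested bucket search over a mutable dict by five cumulative
-- "count ≤ threshold" passes whose successive differences are the bucket sizes (alternative).

-- ===== PORT A =====
-- _DEGREE_BUCKETS = [1, 3, 10, 50, 200]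
def pvDEGREE_BUCKETS : List Int := [1, 3, 10, 50, 200]

-- _bucket_label(upper) = f"deg_lte{upper}"
def pvBucketLabel (upper : Int) : String := "deg_lte" ++ PySem.Int.toStr upper

-- inner 'for b in _DEGREE_BUCKETS: if deg <= b: out[label] += 1; placed = True; break'
-- out[l] += 1 is modelled with Dict.modify (the key is always present, so the default is never read)
def pvInner (deg : Int) (bs : List Int) (out : PySem.Dict String Int) :
    PySem.Dict String Int × Bool :=
  match bs with
  | [] => (out, false)
  | b :: rest =>
      if deg ≤ b then (out.modify (pvBucketLabel b) 0 (· + 1), true)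
      else pvInner deg rest out

-- body of the outer 'for deg in entity_degrees' loop
def pvOuterStep (d : PySem.Dict String Int) (deg : Int) : PySem.Dict String Int :=
  let (d', placed) := pvInner deg pvDEGREE_BUCKETS d
  if !placed then d'.modify "deg_over200" 0 (· + 1) else d'

def degree_buckets_py (entity_degrees : List Int) : List (String × Int) :=
  let out : PySem.Dict String Int :=
    pvDEGREE_BUCKETS.foldl (fun d b => d.insert (pvBucketLabel b) 0) PySem.Dict.empty
  let out := out.insert "deg_over200" 0
  let out := entity_degrees.foldl pvOuterStep out
  out.items

-- ===== PORT B =====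
-- sum(d <= t for d in entity_degrees)
def pvCntLe (l : List Int) (t : Int) : Int :=
  (l.map (fun d => if d ≤ t then (1 : Int) else 0)).sum

def degree_buckets_py_alt (entity_degrees : List Int) : List (String × Int) :=
  let n : Int := entity_degrees.length
  let c1 := pvCntLe entity_degrees 1
  let c3 := pvCntLe entity_degrees 3
  let c10 := pvCntLe entity_degrees 10
  let c50 := pvCntLe entity_degrees 50
  let c200 := pvCntLe entity_degrees 200
  [("deg_lte1", c1), ("deg_lte3", c3 - c1), ("deg_lte10", c10 - c3),
   ("deg_lte50", c50 - c10), ("deg_lte200", c200 - c50), ("deg_over200", n - c200)]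

-- ===== PRECONDITION & SPEC =====
def Spec_degree_buckets_py (entity_degrees : List Int) (out : List (String × Int)) : Prop := out = degree_buckets_py_alt entity_degrees
instance (entity_degrees : List Int) (out : List (String × Int)) : Decidable (Spec_degree_buckets_py entity_degrees out) := by unfold Spec_degree_buckets_py; infer_instance

-- ===== CLAIM (what is proved, stated in full; the proofs are below) =====
def Claim_equal_degree_buckets_py : Prop := ∀ (entity_degrees : List Int), Dom_degree_buckets_py entity_degrees → Spec_degree_buckets_py entity_degrees (degree_buckets_py entity_degrees)

-- ===== LEMMAS AND PROOFS =====

theorem pvCntLe_cons (d : Int) (l : List Int) (t : Int) :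
    pvCntLe (d :: l) t = (if d ≤ t then 1 else 0) + pvCntLe l t := by
  simp [pvCntLe]

theorem pvLab1 : pvBucketLabel 1 = "deg_lte1" := rfl
theorem pvLab3 : pvBucketLabel 3 = "deg_lte3" := rfl
theorem pvLab10 : pvBucketLabel 10 = "deg_lte10" := rfl
theorem pvLab50 : pvBucketLabel 50 = "deg_lte50" := rfl
theorem pvLab200 : pvBucketLabel 200 = "deg_lte200" := rfl

theorem pvMod1 (a b c d e f : Int) :
    (PySem.Dict.mk [("deg_lte1", a), ("deg_lte3", b), ("deg_lte10", c), ("deg_lte50", d), ("deg_lte200", e), ("deg_over200", f)]).modify "deg_lte1" 0 (· + 1) =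
    PySem.Dict.mk [("deg_lte1", a + 1), ("deg_lte3", b), ("deg_lte10", c), ("deg_lte50", d), ("deg_lte200", e), ("deg_over200", f)] := by
  simp [PySem.Dict.modify, PySem.Dict.getD, PySem.Dict.get?, PySem.Dict.insert]

theorem pvMod3 (a b c d e f : Int) :
    (PySem.Dict.mk [("deg_lte1", a), ("deg_lte3", b), ("deg_lte10", c), ("deg_lte50", d), ("deg_lte200", e), ("deg_over200", f)]).modify "deg_lte3" 0 (· + 1) =
    PySem.Dict.mk [("deg_lte1", a), ("deg_lte3", b + 1), ("deg_lte10", c), ("deg_lte50", d), ("deg_lte200", e), ("deg_over200", f)] := by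
  simp [PySem.Dict.modify, PySem.Dict.getD, PySem.Dict.get?, PySem.Dict.insert]

theorem pvMod10 (a b c d e f : Int) :
    (PySem.Dict.mk [("deg_lte1", a), ("deg_lte3", b), ("deg_lte10", c), ("deg_lte50", d), ("deg_lte200", e), ("deg_over200", f)]).modify "deg_lte10" 0 (· + 1) =
    PySem.Dict.mk [("deg_lte1", a), ("deg_lte3", b), ("deg_lte10", c + 1), ("deg_lte50", d), ("deg_lte200", e), ("deg_over200", f)] := by
  simp [PySem.Dict.modify, PySem.Dict.getD, PySem.Dict.get?, PySem.Dict.insert]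

theorem pvMod50 (a b c d e f : Int) :
    (PySem.Dict.mk [("deg_lte1", a), ("deg_lte3", b), ("deg_lte10", c), ("deg_lte50", d), ("deg_lte200", e), ("deg_over200", f)]).modify "deg_lte50" 0 (· + 1) =
    PySem.Dict.mk [("deg_lte1", a), ("deg_lte3", b), ("deg_lte10", c), ("deg_lte50", d + 1), ("deg_lte200", e), ("deg_over200", f)] := by
  simp [PySem.Dict.modify, PySem.Dict.getD, PySem.Dict.get?, PySem.Dict.insert]

theorem pvMod200 (a b c d e f : Int) :
    (PySem.Dict.mk [("deg_lte1", a), ("deg_lte3", b), ("deg_lte10", c), ("deg_lte50", d), ("deg_lte200", e), ("deg_over200", f)]).modify "deg_lte200" 0 (· + 1) =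
    PySem.Dict.mk [("deg_lte1", a), ("deg_lte3", b), ("deg_lte10", c), ("deg_lte50", d), ("deg_lte200", e + 1), ("deg_over200", f)] := by
  simp [PySem.Dict.modify, PySem.Dict.getD, PySem.Dict.get?, PySem.Dict.insert]

theorem pvModOver (a b c d e f : Int) :
    (PySem.Dict.mk [("deg_lte1", a), ("deg_lte3", b), ("deg_lte10", c), ("deg_lte50", d), ("deg_lte200", e), ("deg_over200", f)]).modify "deg_over200" 0 (· + 1) =
    PySem.Dict.mk [("deg_lte1", a), ("deg_lte3", b), ("deg_lte10", c), ("deg_lte50", d), ("deg_lte200", e), ("deg_over200", f + 1)] := by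
  simp [PySem.Dict.modify, PySem.Dict.getD, PySem.Dict.get?, PySem.Dict.insert]

theorem pvStep1 (x a b c d e f : Int) (h : x ≤ 1) :
    pvOuterStep (PySem.Dict.mk [("deg_lte1", a), ("deg_lte3", b), ("deg_lte10", c), ("deg_lte50", d), ("deg_lte200", e), ("deg_over200", f)]) x =
    PySem.Dict.mk [("deg_lte1", a + 1), ("deg_lte3", b), ("deg_lte10", c), ("deg_lte50", d), ("deg_lte200", e), ("deg_over200", f)] := by
  simp only [pvOuterStep, pvInner, pvDEGREE_BUCKETS, if_pos h, pvLab1, pvMod1,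
    Bool.not_true, Bool.false_eq_true, if_false]

theorem pvStep3 (x a b c d e f : Int) (n1 : ¬ x ≤ 1) (h : x ≤ 3) :
    pvOuterStep (PySem.Dict.mk [("deg_lte1", a), ("deg_lte3", b), ("deg_lte10", c), ("deg_lte50", d), ("deg_lte200", e), ("deg_over200", f)]) x =
    PySem.Dict.mk [("deg_lte1", a), ("deg_lte3", b + 1), ("deg_lte10", c), ("deg_lte50", d), ("deg_lte200", e), ("deg_over200", f)] := by
  simp only [pvOuterStep, pvInner, pvDEGREE_BUCKETS, if_neg n1, if_pos h, pvLab3, pvMod3,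
    Bool.not_true, Bool.false_eq_true, if_false]

theorem pvStep10 (x a b c d e f : Int) (n1 : ¬ x ≤ 1) (n3 : ¬ x ≤ 3) (h : x ≤ 10) :
    pvOuterStep (PySem.Dict.mk [("deg_lte1", a), ("deg_lte3", b), ("deg_lte10", c), ("deg_lte50", d), ("deg_lte200", e), ("deg_over200", f)]) x =
    PySem.Dict.mk [("deg_lte1", a), ("deg_lte3", b), ("deg_lte10", c + 1), ("deg_lte50", d), ("deg_lte200", e), ("deg_over200", f)] := by
  simp only [pvOuterStep, pvInner, pvDEGREE_BUCKETS, if_neg n1, if_neg n3, if_pos h, pvLab10, pvMod10,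
    Bool.not_true, Bool.false_eq_true, if_false]

theorem pvStep50 (x a b c d e f : Int) (n1 : ¬ x ≤ 1) (n3 : ¬ x ≤ 3) (n10 : ¬ x ≤ 10) (h : x ≤ 50) :
    pvOuterStep (PySem.Dict.mk [("deg_lte1", a), ("deg_lte3", b), ("deg_lte10", c), ("deg_lte50", d), ("deg_lte200", e), ("deg_over200", f)]) x =
    PySem.Dict.mk [("deg_lte1", a), ("deg_lte3", b), ("deg_lte10", c), ("deg_lte50", d + 1), ("deg_lte200", e), ("deg_over200", f)] := by
  simp only [pvOuterStep, pvInner, pvDEGREE_BUCKETS, if_neg n1, if_neg n3, if_neg n10, if_pos h, pvLab50, pvMod50,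
    Bool.not_true, Bool.false_eq_true, if_false]

theorem pvStep200 (x a b c d e f : Int) (n1 : ¬ x ≤ 1) (n3 : ¬ x ≤ 3) (n10 : ¬ x ≤ 10) (n50 : ¬ x ≤ 50) (h : x ≤ 200) :
    pvOuterStep (PySem.Dict.mk [("deg_lte1", a), ("deg_lte3", b), ("deg_lte10", c), ("deg_lte50", d), ("deg_lte200", e), ("deg_over200", f)]) x =
    PySem.Dict.mk [("deg_lte1", a), ("deg_lte3", b), ("deg_lte10", c), ("deg_lte50", d), ("deg_lte200", e + 1), ("deg_over200", f)] := by
  simp only [pvOuterStep, pvInner, pvDEGREE_BUCKETS, if_neg n1, if_neg n3, if_neg n10, if_neg n50, if_pos h, pvLab200, pvMod200,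
    Bool.not_true, Bool.false_eq_true, if_false]

theorem pvStepOver (x a b c d e f : Int) (n1 : ¬ x ≤ 1) (n3 : ¬ x ≤ 3) (n10 : ¬ x ≤ 10) (n50 : ¬ x ≤ 50) (n200 : ¬ x ≤ 200) :
    pvOuterStep (PySem.Dict.mk [("deg_lte1", a), ("deg_lte3", b), ("deg_lte10", c), ("deg_lte50", d), ("deg_lte200", e), ("deg_over200", f)]) x =
    PySem.Dict.mk [("deg_lte1", a), ("deg_lte3", b), ("deg_lte10", c), ("deg_lte50", d), ("deg_lte200", e), ("deg_over200", f + 1)] := by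
  simp only [pvOuterStep, pvInner, pvDEGREE_BUCKETS, if_neg n1, if_neg n3, if_neg n10, if_neg n50, if_neg n200, pvModOver,
    Bool.not_false, if_true]

-- invariant of A's outer loop over a dict of exactly the six keys
theorem pvLoop_invariant (l : List Int) (a b c d e f : Int) :
    l.foldl pvOuterStep
      (PySem.Dict.mk [("deg_lte1", a), ("deg_lte3", b), ("deg_lte10", c), ("deg_lte50", d), ("deg_lte200", e), ("deg_over200", f)]) =
    PySem.Dict.mk [("deg_lte1", a + pvCntLe l 1),
      ("deg_lte3", b + (pvCntLe l 3 - pvCntLe l 1)),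
      ("deg_lte10", c + (pvCntLe l 10 - pvCntLe l 3)),
      ("deg_lte50", d + (pvCntLe l 50 - pvCntLe l 10)),
      ("deg_lte200", e + (pvCntLe l 200 - pvCntLe l 50)),
      ("deg_over200", f + ((l.length : Int) - pvCntLe l 200))] := by
  induction l generalizing a b c d e f with
  | nil => simp [pvCntLe]
  | cons x xs ih =>
      rcases le_or_gt x 1 with h | g1
      · rw [List.foldl_cons, pvStep1 x a b c d e f h, ih]
        simp only [pvCntLe_cons, if_pos (show x ≤ 1 by omega), if_pos (show x ≤ 3 by omega), if_pos (show x ≤ 10 by omega), if_pos (show x ≤ 50 by omega), if_pos (show x ≤ 200 by omega),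
          PySem.Dict.mk.injEq, List.cons.injEq, Prod.mk.injEq, List.length_cons]
        and_intros <;> first
          | trivial | (push_cast; ring)
      · rcases le_or_gt x 3 with h | g3
        · have n1 : ¬ x ≤ 1 := by omega
          rw [List.foldl_cons, pvStep3 x a b c d e f n1 h, ih]
          simp only [pvCntLe_cons, if_neg n1, if_pos (show x ≤ 3 by omega), if_pos (show x ≤ 10 by omega), if_pos (show x ≤ 50 by omega), if_pos (show x ≤ 200 by omega),
            PySem.Dict.mk.injEq, List.cons.injEq, Prod.mk.injEq, List.length_cons]
          and_intros <;> first
            | trivial | (push_cast; ring)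
        · rcases le_or_gt x 10 with h | g10
          · have n1 : ¬ x ≤ 1 := by omega
            have n3 : ¬ x ≤ 3 := by omega
            rw [List.foldl_cons, pvStep10 x a b c d e f n1 n3 h, ih]
            simp only [pvCntLe_cons, if_neg n1, if_neg n3, if_pos (show x ≤ 10 by omega), if_pos (show x ≤ 50 by omega), if_pos (show x ≤ 200 by omega),
              PySem.Dict.mk.injEq, List.cons.injEq, Prod.mk.injEq, List.length_cons]
            and_intros <;> first
              | trivial | (push_cast; ring)
          · rcases le_or_gt x 50 with h | g50
            · have n1 : ¬ x ≤ 1 := by omega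
              have n3 : ¬ x ≤ 3 := by omega
              have n10 : ¬ x ≤ 10 := by omega
              rw [List.foldl_cons, pvStep50 x a b c d e f n1 n3 n10 h, ih]
              simp only [pvCntLe_cons, if_neg n1, if_neg n3, if_neg n10, if_pos (show x ≤ 50 by omega), if_pos (show x ≤ 200 by omega),
                PySem.Dict.mk.injEq, List.cons.injEq, Prod.mk.injEq, List.length_cons]
              and_intros <;> first
                | trivial | (push_cast; ring)
            · rcases le_or_gt x 200 with h | g200
              · have n1 : ¬ x ≤ 1 := by omega
                have n3 : ¬ x ≤ 3 := by omega
                have n10 : ¬ x ≤ 10 := by omega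
                have n50 : ¬ x ≤ 50 := by omega
                rw [List.foldl_cons, pvStep200 x a b c d e f n1 n3 n10 n50 h, ih]
                simp only [pvCntLe_cons, if_neg n1, if_neg n3, if_neg n10, if_neg n50, if_pos (show x ≤ 200 by omega),
                  PySem.Dict.mk.injEq, List.cons.injEq, Prod.mk.injEq, List.length_cons]
                and_intros <;> first
                  | trivial | (push_cast; ring)
              · have n1 : ¬ x ≤ 1 := by omega
                have n3 : ¬ x ≤ 3 := by omega
                have n10 : ¬ x ≤ 10 := by omega
                have n50 : ¬ x ≤ 50 := by omega
                have n200 : ¬ x ≤ 200 := by omega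
                rw [List.foldl_cons, pvStepOver x a b c d e f n1 n3 n10 n50 n200, ih]
                simp only [pvCntLe_cons, if_neg n1, if_neg n3, if_neg n10, if_neg n50, if_neg n200,
                  PySem.Dict.mk.injEq, List.cons.injEq, Prod.mk.injEq, List.length_cons]
                and_intros <;> first
                  | trivial | (push_cast; ring)

-- ===== VERDICT (by name: the statement is the Claim_ definition above) =====
theorem degree_buckets_py_spec : Claim_equal_degree_buckets_py := by
  intro l _
  show degree_buckets_py l = degree_buckets_py_alt l
  simp only [degree_buckets_py, degree_buckets_py_alt]
  -- the initial dict comprehension plus the "deg_over200" insert evaluates (definitionally)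
  -- to the literal six-key dict of zeros
  show (List.foldl pvOuterStep
      (PySem.Dict.mk [("deg_lte1", 0), ("deg_lte3", 0), ("deg_lte10", 0),
        ("deg_lte50", 0), ("deg_lte200", 0), ("deg_over200", 0)]) l).items = _
  rw [pvLoop_invariant]
  simp
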